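-- pv_equiv track=rewrite | github.com/openvax/mhctools | mhctools/alleles.py | split_species_prefix
-- ===== SOURCE A (Python) =====
-- SPECIES_PREFIXES = dict(
--     human="HLA",
--     cattle="BoLA",
--     bison="Bibi",
--     dog="DLA",
--     sheep=["OVA", "Ovar", "Ovca"],
--     swine="SLA",
--     mouse=["H2", "H-2"],
--     rainbow_trout="Onmy",
--     rat=["Rano", "Rara", "RT1"],
--     salmon="Sasa",
--     cat="FLA",
--     horse=["ELA", "Eqca"],
--     chimp=["Patr", "ChLA"],
--     bonobo="Papa",
--     white_handed_gibbon="Hyla",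
--     gorilla="Gogo",
--     orangutan=["Popy", "OrLA"],
--     blue_monkey="Cemi",
--     de_brazzas_monkey="Cene",
--     vervet_monkey="Chae",
--     mantled_colobus="Cogu",
--     black_mangabey="Loat",
--     stump_tailed_macaque="Maar",
--     crab_eating_macaque="Mafa",
--     japanese_macaque="Mafu",
--     rhesus_macaque=["Mamu", "RhLA"],
--     pig_tailed_macaque="Mane",
--     lion_tailed_macaque="Masi",
--     drill="Male",
--     mandrill="Masp",
--     olive_baboon="Paan",
--     yellow_baboon="Pacy",
--     hamadryas_baboon="Paha",
--     guinea_baboon="Papp",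
--     chacma_baboon="Paur",
--     entelus_langur="Pren",
--     gelada_baboon="Thge",
--     owl_monkey=["Aoaz", "Aovo"],
--     northern_night_owl_monkey=["Aona", "Aoni", "OmLA"],
--     long_haired_spider_monkey="Atbe",
--     brown_headed_spider_monkey="Atfu",
--     marmoset=["Caja", "MaLA"],
--     pygmy_marmoset="Cepy",
--     dusk_titi_monkey="Camo",
--     tufted_capuchin="Ceap",
--     golden_lion_tamarin="Lero",
--     white_faced_saki="Pipi",
--     saddle_backed_tamarin="Safu",
--     red_crested_tamarin="Sage",
--     moustached_tamarin="Samy",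
--     cotton_top_tamarin="Saoe",
--     squirrel_monkey="Sasc",
--     lemur="Leca")
--
-- def split_species_prefix(name):
--     """
--     Splits off the species component of the allele name from the rest of it.
--
--     Given "HLA-A*02:01", returns ("HLA", "A*02:01").
--     """
--     species = None
--     for species_list in SPECIES_PREFIXES.values():
--         if isinstance(species_list, str):
--             species_list = [species_list]
--         for curr_species in species_list:
--             prefix = name[:len(curr_species) + 1].upper()
--             if prefix == (curr_species.upper() + "-"):
--                 species = curr_species
--                 name = name[len(curr_species) + 1:]
--                 return (species, name)
--     return (species, name)
-- ===== SOURCE B (Python) =====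
-- SPECIES_PREFIXES = dict(
--     human="HLA",
--     cattle="BoLA",
--     bison="Bibi",
--     dog="DLA",
--     sheep=["OVA", "Ovar", "Ovca"],
--     swine="SLA",
--     mouse=["H2", "H-2"],
--     rainbow_trout="Onmy",
--     rat=["Rano", "Rara", "RT1"],
--     salmon="Sasa",
--     cat="FLA",
--     horse=["ELA", "Eqca"],
--     chimp=["Patr", "ChLA"],
--     bonobo="Papa",
--     white_handed_gibbon="Hyla",
--     gorilla="Gogo",
--     orangutan=["Popy", "OrLA"],
--     blue_monkey="Cemi",
--     de_brazzas_monkey="Cene",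
--     vervet_monkey="Chae",
--     mantled_colobus="Cogu",
--     black_mangabey="Loat",
--     stump_tailed_macaque="Maar",
--     crab_eating_macaque="Mafa",
--     japanese_macaque="Mafu",
--     rhesus_macaque=["Mamu", "RhLA"],
--     pig_tailed_macaque="Mane",
--     lion_tailed_macaque="Masi",
--     drill="Male",
--     mandrill="Masp",
--     olive_baboon="Paan",
--     yellow_baboon="Pacy",
--     hamadryas_baboon="Paha",
--     guinea_baboon="Papp",
--     chacma_baboon="Paur",
--     entelus_langur="Pren",
--     gelada_baboon="Thge",
--     owl_monkey=["Aoaz", "Aovo"],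
--     northern_night_owl_monkey=["Aona", "Aoni", "OmLA"],
--     long_haired_spider_monkey="Atbe",
--     brown_headed_spider_monkey="Atfu",
--     marmoset=["Caja", "MaLA"],
--     pygmy_marmoset="Cepy",
--     dusk_titi_monkey="Camo",
--     tufted_capuchin="Ceap",
--     golden_lion_tamarin="Lero",
--     white_faced_saki="Pipi",
--     saddle_backed_tamarin="Safu",
--     red_crested_tamarin="Sage",
--     moustached_tamarin="Samy",
--     cotton_top_tamarin="Saoe",
--     squirrel_monkey="Sasc",
--     lemur="Leca")
--
-- # inverse index built once: uppercased prefix -> original-cased prefix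
-- _PREFIX_BY_UPPER = {
--     p.upper(): p
--     for v in SPECIES_PREFIXES.values()
--     for p in ([v] if isinstance(v, str) else v)
-- }
--
--
-- def split_species_prefix(name):
--     """
--     Splits off the species component of the allele name from the rest of it.
--
--     Given "HLA-A*02:01", returns ("HLA", "A*02:01").
--     """
--     # every species prefix has at most 4 characters, so the dash that splits
--     # one off can only appear among the first 5 characters of the name
--     for i, ch in enumerate(name[:5]):
--         if ch == "-":
--             species = _PREFIX_BY_UPPER.get(name[:i].upper())
--             if species is not None:
--                 return (species, name[i + 1:])
--     return (None, name)
-- ===== Notes on version B (the rewrite author's own statement) =====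
-- stated objective: idiomatic
-- what changed: Instead of testing all 66 species prefixes against the name, B builds once an inverse index from uppercased prefix to its original-cased form and scans only the dash positions in the name's first five characters (prefixes have at most 4 characters), doing one dict lookup per dash.
import Mathlib
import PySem

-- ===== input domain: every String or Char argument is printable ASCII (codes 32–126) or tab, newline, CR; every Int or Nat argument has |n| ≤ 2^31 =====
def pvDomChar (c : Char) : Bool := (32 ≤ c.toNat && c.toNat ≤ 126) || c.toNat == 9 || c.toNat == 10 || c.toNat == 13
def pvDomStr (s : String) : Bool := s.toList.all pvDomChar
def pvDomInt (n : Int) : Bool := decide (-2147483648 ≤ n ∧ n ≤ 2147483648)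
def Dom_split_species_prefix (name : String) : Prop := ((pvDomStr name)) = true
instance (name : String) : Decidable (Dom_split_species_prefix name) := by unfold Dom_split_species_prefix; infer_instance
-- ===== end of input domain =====

-- B replaces A's scan over all 66 species prefixes by a scan over the dash positions in
-- name's first five characters with a single lookup in a precomputed uppercase-prefix index
-- (idiomatic/alternative decomposition; same results, proved equal for all ASCII inputs).

-- ===== PORT A =====
-- SPECIES_PREFIXES.values() in insertion order; a str value is Sum.inl, a list value Sum.inr
def speciesValues : List (Sum String (List String)) :=
  [.inl "HLA", .inl "BoLA", .inl "Bibi", .inl "DLA", .inr ["OVA", "Ovar", "Ovca"],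
   .inl "SLA", .inr ["H2", "H-2"], .inl "Onmy", .inr ["Rano", "Rara", "RT1"],
   .inl "Sasa", .inl "FLA", .inr ["ELA", "Eqca"], .inr ["Patr", "ChLA"], .inl "Papa",
   .inl "Hyla", .inl "Gogo", .inr ["Popy", "OrLA"], .inl "Cemi", .inl "Cene",
   .inl "Chae", .inl "Cogu", .inl "Loat", .inl "Maar", .inl "Mafa", .inl "Mafu",
   .inr ["Mamu", "RhLA"], .inl "Mane", .inl "Masi", .inl "Male", .inl "Masp",
   .inl "Paan", .inl "Pacy", .inl "Paha", .inl "Papp", .inl "Paur", .inl "Pren",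
   .inl "Thge", .inr ["Aoaz", "Aovo"], .inr ["Aona", "Aoni", "OmLA"], .inl "Atbe",
   .inl "Atfu", .inr ["Caja", "MaLA"], .inl "Cepy", .inl "Camo", .inl "Ceap",
   .inl "Lero", .inl "Pipi", .inl "Safu", .inl "Sage", .inl "Samy", .inl "Saoe",
   .inl "Sasc", .inl "Leca"]

-- the inner 'for curr_species in species_list' loop (early return = some)
def aInner (name : List Char) : List String → Option (String × List Char)
  | [] => none
  | s :: rest =>
    -- prefix = name[:len(curr_species) + 1].upper(); compared with curr_species.upper() + "-"
    if PySem.Chars.upper (PySem.List.slice name none (some ((s.toList.length : Int) + 1))) =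
        PySem.Chars.upper s.toList ++ ['-'] then
      some (s, PySem.List.slice name (some ((s.toList.length : Int) + 1)) none)
    else aInner name rest

-- the outer 'for species_list in SPECIES_PREFIXES.values()' loop (isinstance wraps a str)
def aOuter (name : List Char) : List (Sum String (List String)) → Option (String × List Char)
  | [] => none
  | v :: rest =>
    match aInner name (match v with | .inl s => [s] | .inr l => l) with
    | some r => some r
    | none => aOuter name rest

def split_species_prefix (name : String) : Option String × String :=
  match aOuter name.toList speciesValues with
  | some (sp, rest) => (some sp, String.ofList rest)
  | none => (none, name)

-- ===== PORT B =====
-- _PREFIX_BY_UPPER: uppercased prefix -> original-cased prefix, built once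
def prefixIndex : PySem.Dict (List Char) String :=
  speciesValues.foldl (fun d v =>
    (match v with | .inl s => [s] | .inr l => l).foldl
      (fun (d : PySem.Dict (List Char) String) (p : String) => d.insert (PySem.Chars.upper p.toList) p) d)
    PySem.Dict.empty

-- 'for i, ch in enumerate(name[:5]): ...'
def bScan (name : List Char) : List (Int × Char) → Option (String × List Char)
  | [] => none
  | (i, ch) :: rest =>
    if ch = '-' then
      match prefixIndex.get? (PySem.Chars.upper (PySem.List.slice name none (some i))) with
      | some sp => some (sp, PySem.List.slice name (some (i + 1)) none)
      | none => bScan name rest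
    else bScan name rest

def split_species_prefix_alt (name : String) : Option String × String :=
  match bScan name.toList
      (PySem.List.enumerate (PySem.List.slice name.toList none (some 5)) 0) with
  | some (sp, rest) => (some sp, String.ofList rest)
  | none => (none, name)

-- ===== PRECONDITION & SPEC =====
def Spec_split_species_prefix (name : String) (out : Option String × String) : Prop := out = split_species_prefix_alt name
instance (name : String) (out : Option String × String) : Decidable (Spec_split_species_prefix name out) := by unfold Spec_split_species_prefix; infer_instance

-- ===== CLAIM (what is proved, stated in full; the proofs are below) =====
def Claim_equal_split_species_prefix : Prop := ∀ (name : String), Dom_split_species_prefix name → Spec_split_species_prefix name (split_species_prefix name)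

-- ===== LEMMAS AND PROOFS =====

-- the 66 prefixes in A's scan order
def flatPrefixes : List String :=
  speciesValues.flatMap (fun v => match v with | .inl s => [s] | .inr l => l)

-- A's per-prefix test, as a Bool predicate on the name's character list
def pfxMatch (s : String) (n : List Char) : Bool :=
  PySem.Chars.upper (n.take (s.length + 1)) == PySem.Chars.upper s.toList ++ ['-']

theorem upper_length (n : List Char) : (PySem.Chars.upper n).length = n.length := by
  simp [PySem.Chars.upper]

theorem upper_take (n : List Char) (k : Nat) :
    PySem.Chars.upper (n.take k) = (PySem.Chars.upper n).take k := by
  simp [PySem.Chars.upper, List.map_take]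

theorem upperChar_dash (c : Char) : PySem.Chars.upperChar c = '-' ↔ c = '-' := by
  unfold PySem.Chars.upperChar PySem.Chars.islower
  split
  · next h =>
    simp only [Bool.and_eq_true, decide_eq_true_eq] at h
    obtain ⟨h1, h2⟩ := h
    have ha : 97 ≤ c.toNat := h1
    have hb : c.toNat ≤ 122 := h2
    have hd : ('-').toNat = 45 := by decide
    constructor
    · intro heq
      have hval : (c.toNat - 32).isValidChar := by constructor; omega
      have := congrArg Char.toNat heq
      rw [Char.toNat_ofNat, if_pos hval] at this
      omega
    · intro heq; subst heq; simp at ha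
  · simp

theorem pfxMatch_iff (s : String) (n : List Char) :
    pfxMatch s n = true ↔
      (PySem.Chars.upper s.toList ++ ['-']) <+: PySem.Chars.upper n := by
  unfold pfxMatch
  rw [beq_iff_eq, upper_take]
  have hlen : (PySem.Chars.upper s.toList ++ ['-']).length = s.length + 1 := by
    simp [upper_length]
  rw [List.prefix_iff_eq_take, hlen]
  exact ⟨fun h => h.symm, fun h => h.symm⟩

theorem aInner_eq (n : List Char) (l : List String) :
    aInner n l = (l.find? (fun s => pfxMatch s n)).map
      (fun s => (s, n.drop (s.length + 1))) := by
  induction l with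
  | nil => simp [aInner]
  | cons s rest ih =>
    have hsl : s.toList.length = s.length := by simp
    have hc : ((s.toList.length : Int) + 1) = ((s.length + 1 : Nat) : Int) := by
      rw [hsl]; push_cast; ring
    rw [aInner, hc, PySem.List.slice_to_natCast, PySem.List.slice_from_natCast]
    by_cases h : PySem.Chars.upper (n.take (s.length + 1)) =
        PySem.Chars.upper s.toList ++ ['-']
    · have hb : pfxMatch s n = true := by unfold pfxMatch; exact beq_iff_eq.mpr h
      simp [h, List.find?, hb]
    · have hb : pfxMatch s n = false := by
        unfold pfxMatch; exact beq_eq_false_iff_ne.mpr h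
      simp [h, List.find?, hb, ih]

theorem aOuter_eq (n : List Char) (vs : List (Sum String (List String))) :
    aOuter n vs =
      ((vs.flatMap (fun v => match v with | .inl s => [s] | .inr l => l)).find?
        (fun s => pfxMatch s n)).map (fun s => (s, n.drop (s.length + 1))) := by
  induction vs with
  | nil => simp [aOuter]
  | cons v rest ih =>
    simp only [aOuter, aInner_eq, List.flatMap_cons, List.find?_append, ih]
    cases h : (match v with | .inl s => [s] | .inr l => l).find? (fun s => pfxMatch s n) with
    | none => simp [h]
    | some s => simp [h]

-- facts about the fixed prefix table, by computation
set_option maxRecDepth 100000 in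
theorem flat_len : ∀ s ∈ flatPrefixes, s.length ≤ 4 := by decide

set_option maxRecDepth 100000 in
theorem flat_uniq : ∀ p ∈ flatPrefixes, ∀ q ∈ flatPrefixes,
    (PySem.Chars.upper p.toList ++ ['-']).isPrefixOf
      (PySem.Chars.upper q.toList ++ ['-']) = true → p = q := by decide

set_option maxRecDepth 100000 in
theorem idx_hit : ∀ p ∈ flatPrefixes,
    prefixIndex.get? (PySem.Chars.upper p.toList) = some p := by decide

set_option maxRecDepth 100000 in
theorem idx_items : ∀ pr ∈ prefixIndex.items,
    pr.2 ∈ flatPrefixes ∧ PySem.Chars.upper pr.2.toList = pr.1 := by decide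

theorem match_unique {n : List Char} {p q : String}
    (hp : p ∈ flatPrefixes) (hq : q ∈ flatPrefixes)
    (hmp : pfxMatch p n = true) (hmq : pfxMatch q n = true) : p = q := by
  have h1 := (pfxMatch_iff p n).mp hmp
  have h2 := (pfxMatch_iff q n).mp hmq
  rcases List.prefix_or_prefix_of_prefix h1 h2 with h | h
  · exact flat_uniq p hp q hq (List.isPrefixOf_iff_prefix.mpr h)
  · exact (flat_uniq q hq p hp (List.isPrefixOf_iff_prefix.mpr h)).symm

-- a hit of B's scan at dash position k yields the (unique) matching prefix of length k
theorem hit_gives_match {n : List Char} {k : Nat} (hk : k < n.length)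
    (hc : n[k] = '-') {sp : String}
    (hget : prefixIndex.get? (PySem.Chars.upper (n.take k)) = some sp) :
    sp ∈ flatPrefixes ∧ sp.length = k ∧ pfxMatch sp n = true := by
  have hmem := PySem.Dict.mem_items_of_get?_eq_some prefixIndex hget
  obtain ⟨hflat, hkey⟩ := idx_items _ hmem
  dsimp only at hflat hkey
  have hsl : sp.toList.length = sp.length := by simp
  have hlen : sp.length = k := by
    have h := congrArg List.length hkey
    rw [upper_length, upper_length, List.length_take] at h
    omega
  have hk' : k < (PySem.Chars.upper n).length := by rw [upper_length]; exact hk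
  refine ⟨hflat, hlen, ?_⟩
  rw [pfxMatch_iff, hkey, upper_take]
  have hgetm : (PySem.Chars.upper n)[k]'hk' = '-' := by
    simp only [PySem.Chars.upper, List.getElem_map, hc]
    decide
  have hopt : (PySem.Chars.upper n)[k]? = some '-' := by
    rw [List.getElem?_eq_getElem hk', hgetm]
  calc (PySem.Chars.upper n).take k ++ ['-']
      = (PySem.Chars.upper n).take (k + 1) := by
        rw [List.take_add_one, hopt]; rfl
    _ <+: PySem.Chars.upper n := List.take_prefix _ _

-- conversely, a matching prefix s puts a dash at position |s| of the name
theorem match_gives {n : List Char} {s : String} (hs : pfxMatch s n = true) :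
    ∃ h : s.length < n.length,
      n[s.length] = '-' ∧
      PySem.Chars.upper (n.take s.length) = PySem.Chars.upper s.toList := by
  have hpre := (pfxMatch_iff s n).mp hs
  have hsl : s.toList.length = s.length := by simp
  have hlt : s.length < n.length := by
    have := hpre.length_le
    simp only [List.length_append, upper_length, hsl, List.length_singleton] at this
    omega
  have hlt' : s.length < (PySem.Chars.upper n).length := by rw [upper_length]; exact hlt
  have htake := List.prefix_iff_eq_take.mp hpre
  simp only [List.length_append, upper_length, hsl, List.length_singleton] at htake
  rw [List.take_add_one, List.getElem?_eq_getElem hlt'] at htake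
  have hlens : (PySem.Chars.upper s.toList).length =
      ((PySem.Chars.upper n).take s.length).length := by
    rw [upper_length, List.length_take, hsl]; omega
  obtain ⟨hA, hB⟩ := List.append_inj htake hlens
  have hmap : (PySem.Chars.upper n)[s.length]'hlt' =
      PySem.Chars.upperChar (n[s.length]'hlt) := by
    simp only [PySem.Chars.upper, List.getElem_map]
  refine ⟨hlt, ?_, ?_⟩
  · have hone : PySem.Chars.upperChar (n[s.length]'hlt) = '-' := by
      rw [← hmap]
      have := congrArg (fun l => l.head?) hB
      simpa using this.symm
    exact (upperChar_dash _).mp hone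
  · rw [upper_take]; exact hA.symm

set_option maxRecDepth 400000 in
theorem bScan_cons (n : List Char) (i : Int) (c : Char) (rest : List (Int × Char)) :
    bScan n ((i, c) :: rest) =
      if c = '-' then
        (match prefixIndex.get? (PySem.Chars.upper (PySem.List.slice n none (some i))) with
          | some sp => some (sp, PySem.List.slice n (some (i + 1)) none)
          | none => bScan n rest)
      else bScan n rest := rfl

set_option maxRecDepth 400000 in
theorem bscan_no_hit (n : List Char) (pairs : List (Int × Char))
    (h : ∀ i c, (i, c) ∈ pairs →
      ¬(c = '-' ∧ (prefixIndex.get? (PySem.Chars.upper (PySem.List.slice n none (some i)))).isSome = true)) :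
    bScan n pairs = none := by
  induction pairs with
  | nil => rfl
  | cons p rest ih =>
    obtain ⟨i, c⟩ := p
    have hp := h i c (List.mem_cons_self ..)
    rw [bScan_cons]
    by_cases hc : c = '-'
    · rw [if_pos hc]
      cases hg : prefixIndex.get? (PySem.Chars.upper (PySem.List.slice n none (some i))) with
      | some sp => exact absurd ⟨hc, by simp [hg]⟩ hp
      | none =>
        exact ih (fun j d hm => h j d (List.mem_cons_of_mem _ hm))
    · rw [if_neg hc]
      exact ih (fun j d hm => h j d (List.mem_cons_of_mem _ hm))

set_option maxRecDepth 100000 in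
theorem bscan_hit (n : List Char) (l1 : List (Int × Char)) (i : Int) (c : Char)
    (l2 : List (Int × Char)) (sp : String)
    (h1 : ∀ j d, (j, d) ∈ l1 →
      ¬(d = '-' ∧ (prefixIndex.get? (PySem.Chars.upper (PySem.List.slice n none (some j)))).isSome = true))
    (hc : c = '-')
    (hget : prefixIndex.get? (PySem.Chars.upper (PySem.List.slice n none (some i))) = some sp) :
    bScan n (l1 ++ (i, c) :: l2) = some (sp, PySem.List.slice n (some (i + 1)) none) := by
  induction l1 with
  | nil =>
    rw [List.nil_append, bScan_cons, if_pos hc, hget]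
  | cons p rest ih =>
    obtain ⟨j, d⟩ := p
    have hp := h1 j d (List.mem_cons_self ..)
    rw [List.cons_append, bScan_cons]
    by_cases hd : d = '-'
    · rw [if_pos hd]
      cases hg : prefixIndex.get? (PySem.Chars.upper (PySem.List.slice n none (some j))) with
      | some sq => exact absurd ⟨hd, by simp [hg]⟩ hp
      | none =>
        exact ih (fun j' d' hm => h1 j' d' (List.mem_cons_of_mem _ hm))
    · rw [if_neg hd]
      exact ih (fun j' d' hm => h1 j' d' (List.mem_cons_of_mem _ hm))

-- ===== VERDICT (by name: the statement is the Claim_ definition above) =====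
set_option maxRecDepth 100000 in
theorem split_species_prefix_spec : Claim_equal_split_species_prefix := by
  intro name _
  unfold Spec_split_species_prefix split_species_prefix split_species_prefix_alt
  rw [aOuter_eq]
  have hflatdef : speciesValues.flatMap
      (fun v => match v with | .inl s => [s] | .inr l => l) = flatPrefixes := rfl
  rw [hflatdef]
  set n := name.toList with hn
  have hslice5 : PySem.List.slice n none (some 5) = n.take 5 := by
    rw [show (some (5:Int)) = some (((5:Nat):Int)) from by norm_num,
      PySem.List.slice_to_natCast]
  rw [hslice5]
  cases hfind : flatPrefixes.find? (fun s => pfxMatch s n) with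
  | none =>
    have hnone := List.find?_eq_none.mp hfind
    have hb : bScan n (PySem.List.enumerate (n.take 5) 0) = none := by
      apply bscan_no_hit
      intro i c hm
      rintro ⟨hc, hsome⟩
      rw [PySem.List.mem_enumerate_iff] at hm
      obtain ⟨k, hk, hpk⟩ := hm
      have hi : i = (k : Int) := by
        have := congrArg Prod.fst hpk; simpa using this
      have hck : c = (n.take 5)[k]'hk := by
        have := congrArg Prod.snd hpk; simpa using this
      have hk5 : k < n.length := by
        have := hk; rw [List.length_take] at this; omega
      have hcn : n[k]'hk5 = '-' := by
        rw [hck, List.getElem_take] at hc; exact hc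
      rw [hi, PySem.List.slice_to_natCast] at hsome
      obtain ⟨sp, hget⟩ := Option.isSome_iff_exists.mp hsome
      obtain ⟨hflat', _, hmatch⟩ := hit_gives_match hk5 hcn hget
      exact absurd hmatch (hnone _ hflat')
    rw [hb]
    rfl
  | some s =>
    have hps := List.find?_some hfind
    have hmem := List.mem_of_find?_eq_some hfind
    obtain ⟨hlt, hdash, hup⟩ := match_gives hps
    have hle4 := flat_len s hmem
    have hm5 : s.length < (n.take 5).length := by rw [List.length_take]; omega
    have htt : (n.take 5).take s.length = n.take s.length := by
      rw [List.take_take]; congr 1; omega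
    have hgel : (n.take 5)[s.length]'hm5 = '-' := by
      rw [List.getElem_take]; exact hdash
    have hsplit : n.take 5 =
        n.take s.length ++ '-' :: (n.take 5).drop (s.length + 1) := by
      conv_lhs => rw [← List.take_append_drop s.length (n.take 5)]
      rw [List.drop_eq_getElem_cons hm5, htt, hgel]
    have hl1 : (n.take s.length).length = s.length := by
      rw [List.length_take]; omega
    have hb : bScan n (PySem.List.enumerate (n.take 5) 0) =
        some (s, PySem.List.slice n (some ((s.length : Int) + 1)) none) := by
      rw [hsplit, PySem.List.enumerate_append, PySem.List.enumerate_cons, hl1]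
      have hz : (0 : Int) + (s.length : Int) = (s.length : Int) := by ring
      rw [hz]
      apply bscan_hit
      · intro j d hm
        rintro ⟨hd, hsome⟩
        rw [PySem.List.mem_enumerate_iff] at hm
        obtain ⟨k, hk, hpk⟩ := hm
        have hklt : k < s.length := by
          have := hk; rw [hl1] at this; exact this
        have hkn : k < n.length := by omega
        have hj : j = (k : Int) := by
          have := congrArg Prod.fst hpk; simpa using this
        have hdk : d = n[k]'hkn := by
          have h2 := congrArg Prod.snd hpk
          simp only at h2
          rw [h2, List.getElem_take]
        have hcn : n[k]'hkn = '-' := by rw [← hdk]; exact hd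
        rw [hj, PySem.List.slice_to_natCast] at hsome
        obtain ⟨sp', hget⟩ := Option.isSome_iff_exists.mp hsome
        obtain ⟨hflat', hlen', hmatch⟩ := hit_gives_match hkn hcn hget
        have heqs := match_unique hflat' hmem hmatch hps
        rw [heqs] at hlen'
        omega
      · rfl
      · rw [PySem.List.slice_to_natCast, hup]
        exact idx_hit s hmem
    rw [hb]
    have hcast : ((s.length : Int) + 1) = ((s.length + 1 : Nat) : Int) := by push_cast; ring
    rw [hcast, PySem.List.slice_from_natCast]
    rfl
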